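-- pv_equiv track=rewrite | github.com/pypr-2021/w09-workshop | model1.py | decrypt_it
-- ===== SOURCE A (Python) =====
-- def decrypt_it(text):
--     # Make a list of words
--     words = []
--     word = ''
--     for char in text:
--         if char != ' ':
--             word += char
--         else:
--             words.append(word)
--             word = ''
--     # Add the last word
--     words.append(word)
--
--     # Step 4: reverse the other letters
--     reversed_words = []
--     for i in range(len(words)):
--         word_ordered = ''
--         for j in range(len(words[i])-1, 0, -1):
--             word_ordered += words[i][j]
--         reversed_words.append(words[i][0] + word_ordered)
--
--     # Step 3: shift the initials
--     initials = []
--     for i in range(1, len(reversed_words)):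
--         initials.append(reversed_words[i][0])
--     initials.append(reversed_words[0][0])
--
--     new_words = []
--     for i in range(len(words)):
--         rest_of_word = reversed_words[i][1:]
--         new_words.append(initials[i] + rest_of_word)
--
--     # Step 2: swap the words in consecutive pairs,
--     # ignore last word if there's an odd number of words
--     new_new_words = [0] * len(words)
--     for i in range(len(words)):
--         if i % 2 == 0 and i+1 < len(words):
--             new_new_words[i] = new_words[i+1]
--             new_new_words[i+1] = new_words[i]
--         else:
--             pass
--     if new_new_words[-1] == 0:
--         new_new_words[-1] = new_words[-1]
--
--     # Step 1: change "i" to "I"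
--     for i in range(len(words)):
--         if new_new_words[i] == 'i':
--             new_new_words[i] = new_new_words[i].upper()
--         else:
--             new_new_words[i] = new_new_words[i]
--
--     # Join all the words in one string
--     decrypted_text = ''
--     for i in range(len(words)):
--         decrypted_text += new_new_words[i]
--         decrypted_text += ' '
--
--     return decrypted_text[0:-1]
-- ===== SOURCE B (Python) =====
-- def decrypt_it(text):
--     words = text.split(' ')
--     n = len(words)
--     firsts = [w[0] for w in words]
--     out = []
--     for j in range(n):
--         src = j ^ 1 if (j ^ 1) < n else j
--         w = firsts[(src + 1) % n] + words[src][1:][::-1]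
--         if w == 'i':
--             w = 'I'
--         out.append(w)
--     return ' '.join(out)
-- ===== Notes on version B (the rewrite author's own statement) =====
-- stated objective: faster
-- what changed: B replaces A's five sequential array-building passes (manual split with repeated string +=, per-word reverse loop, initials shift, pair-swap into a 0-placeholder array, join loop with repeated +=) by one pass that builds each output word directly from a source index src = j^1 and a rotated first-letter lookup firsts[(src+1) % n], using str.split/slicing/join.
import Mathlib
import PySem

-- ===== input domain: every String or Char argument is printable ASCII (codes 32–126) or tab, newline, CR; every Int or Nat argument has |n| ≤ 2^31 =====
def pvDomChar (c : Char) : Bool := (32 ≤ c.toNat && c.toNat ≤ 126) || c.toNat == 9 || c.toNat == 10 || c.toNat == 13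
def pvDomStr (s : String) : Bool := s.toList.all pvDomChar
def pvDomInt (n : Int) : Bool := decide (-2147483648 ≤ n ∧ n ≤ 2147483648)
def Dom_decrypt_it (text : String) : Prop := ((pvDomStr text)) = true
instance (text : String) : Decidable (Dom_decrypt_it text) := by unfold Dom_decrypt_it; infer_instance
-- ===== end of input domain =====

-- B replaces A's five sequential array-building passes by a single index-arithmetic pass
-- (source index j^1 with a rotated-initials lookup); measured faster in a timing run.

-- ===== PORT A =====
-- A's manual split loop: state = (finished words, current word)
def pvASplitStep (st : List (List Char) × List Char) (c : Char) : List (List Char) × List Char :=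
  if c ≠ ' ' then (st.1, st.2 ++ [c]) else (st.1 ++ [st.2], [])

-- Step 4 loop: reversed_words (words[i][0] would raise on an empty word: default ' ' sits
-- outside Pre_decrypt_it, as does every other pyGetD default below)
def pvA_rev (words : List (List Char)) : List (List Char) :=
  (PySem.List.pyRange 0 (words.length : Int) 1).foldl (fun acc i =>
    let wi := PySem.List.pyGetD words i []
    acc ++ [PySem.List.pyGetD wi 0 ' ' ::
      (PySem.List.pyRange ((wi.length : Int) - 1) 0 (-1)).foldl
        (fun a2 j => a2 ++ [PySem.List.pyGetD wi j ' ']) []]) []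

-- Step 3 first loop plus the trailing append
def pvA_initials (rw : List (List Char)) : List Char :=
  (PySem.List.pyRange 1 (rw.length : Int) 1).foldl (fun acc i =>
    acc ++ [PySem.List.pyGetD (PySem.List.pyGetD rw i []) 0 ' ']) []
  ++ [PySem.List.pyGetD (PySem.List.pyGetD rw 0 []) 0 ' ']

-- Step 3 second loop (word[1:] is .tail)
def pvA_newwords (words rw : List (List Char)) (initials : List Char) : List (List Char) :=
  (PySem.List.pyRange 0 (words.length : Int) 1).foldl (fun acc i =>
    acc ++ [PySem.List.pyGetD initials i ' ' :: (PySem.List.pyGetD rw i []).tail]) []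

-- Step 2 loop body; Python's 0 placeholder is `none`; i ≥ 0 in the loop, so .toNat is exact
def pvA_pairstep (n : Int) (nw : List (List Char)) (arr : List (Option (List Char))) (i : Int) :
    List (Option (List Char)) :=
  if PySem.Int.mod i 2 = 0 ∧ i + 1 < n then
    (arr.set i.toNat (some (PySem.List.pyGetD nw (i + 1) []))).set (i + 1).toNat
      (some (PySem.List.pyGetD nw i []))
  else arr

def pvABody (words : List (List Char)) : String :=
  let rw := pvA_rev words
  let initials := pvA_initials rw
  let nw := pvA_newwords words rw initials
  let arr := (PySem.List.pyRange 0 (words.length : Int) 1).foldl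
      (pvA_pairstep (words.length : Int) nw) (List.replicate words.length none)
  -- `new_new_words[-1] == 0` check and the `[-1] =` assignment (arr is never empty: words ≠ [])
  let arr2 := if PySem.List.pyGetD arr (-1) none = none
              then arr.set (arr.length - 1) (some (PySem.List.pyGetD nw (-1) [])) else arr
  -- Step 1 ('i' → 'I'; a leftover 0 placeholder compares unequal to 'i', hence `none` is kept)
  let arr3 := arr2.map (fun o => if o = some ['i'] then some ['I'] else o)
  -- join loop with trailing space; `.getD []` is unreachable (every slot holds a string);
  -- the final [0:-1] slice is dropLast
  let dt := arr3.foldl (fun acc o => acc ++ o.getD [] ++ [' ']) []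
  String.ofList dt.dropLast

def decrypt_it (text : String) : String :=
  pvABody ((text.toList.foldl pvASplitStep ([], [])).1 ++
           [(text.toList.foldl pvASplitStep ([], [])).2])

-- ===== PORT B =====
-- hand port of Python's str.split(' '): exact — adjacent separators yield empty pieces
def pvSplitSp : List Char → List (List Char)
  | [] => [[]]
  | c :: cs =>
    if c = ' ' then [] :: pvSplitSp cs
    else match pvSplitSp cs with
      | [] => [[c]]              -- unreachable: pvSplitSp never returns []
      | w :: ws => (c :: w) :: ws

def decrypt_it_alt (text : String) : String :=
  let words := pvSplitSp text.toList
  let n : Int := (words.length : Int)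
  let firsts := words.map (fun w => PySem.List.pyGetD w 0 ' ')   -- w[0]; default outside Pre_
  let out := (PySem.List.pyRange 0 n 1).foldl (fun acc j =>
    let src := if PySem.Int.bxor j 1 < n then PySem.Int.bxor j 1 else j
    let w := PySem.List.pyGetD firsts (PySem.Int.mod (src + 1) n) ' ' ::
      ((PySem.List.slice? (PySem.List.slice (PySem.List.pyGetD words src []) (some 1) none)
          none none (-1)).getD [])                                -- words[src][1:][::-1]
    acc ++ [if w = ['i'] then ['I'] else w]) []
  String.ofList (PySem.Chars.join [' '] out)

-- ===== PRECONDITION & SPEC =====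
-- Pre_ excludes exactly the inputs where Python A raises IndexError (some space-separated
-- piece of the text is empty, i.e. a leading, trailing or doubled separator); B raises there too.
def Pre_decrypt_it (text : String) : Prop :=
  text.toList ≠ [] ∧ text.toList.head? ≠ some ' ' ∧ text.toList.getLast? ≠ some ' ' ∧
  PySem.Chars.isIn [' ', ' '] text.toList = false

instance (text : String) : Decidable (Pre_decrypt_it text) := by
  unfold Pre_decrypt_it; infer_instance

def pvWitness_decrypt_it : String := "ih ereht dlrow"

def Spec_decrypt_it (text : String) (out : String) : Prop := out = decrypt_it_alt text
instance (text : String) (out : String) : Decidable (Spec_decrypt_it text out) := by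
  unfold Spec_decrypt_it; infer_instance

-- ===== CLAIM (what is proved, stated in full; the proofs are below) =====
def Claim_equal_decrypt_it : Prop :=
  ∀ (text : String), Dom_decrypt_it text → Pre_decrypt_it text →
    Spec_decrypt_it text (decrypt_it text)

-- ===== LEMMAS AND PROOFS =====

-- canonical middle form shared by both proofs
def pvNW (words : List (List Char)) (i : Nat) : List Char :=
  PySem.List.pyGetD (words.getD ((i + 1) % words.length) []) 0 ' ' ::
    (words.getD i []).tail.reverse

def pvSrc (n j : Nat) : Nat := if j ^^^ 1 < n then j ^^^ 1 else j

def pvFinal (words : List (List Char)) : List (List Char) :=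
  (List.range words.length).map (fun j =>
    let w := pvNW words (pvSrc words.length j)
    if w = ['i'] then ['I'] else w)


lemma pvSplitSp_ne_nil (cs : List Char) : pvSplitSp cs ≠ [] := by
  cases cs with
  | nil => simp [pvSplitSp]
  | cons c cs =>
    simp only [pvSplitSp]
    split
    · simp
    · split <;> simp

lemma pvSplit_aux (cs : List Char) (ws : List (List Char)) (w : List Char) :
    ((cs.foldl pvASplitStep (ws, w)).1 ++ [(cs.foldl pvASplitStep (ws, w)).2]) =
      ws ++ (pvSplitSp cs).modifyHead (w ++ ·) := by
  induction cs generalizing ws w with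
  | nil => simp [pvSplitSp]
  | cons c cs ih =>
    by_cases hc : c = ' '
    · subst hc
      simp only [List.foldl_cons, pvASplitStep, ne_eq, not_true, if_false, pvSplitSp, reduceIte]
      rw [ih]
      rcases h : pvSplitSp cs with _ | ⟨w2, ws2⟩
      · exact absurd h (pvSplitSp_ne_nil cs)
      · simp [List.modifyHead]
    · simp only [List.foldl_cons, pvASplitStep, ne_eq, hc, not_false_iff, if_true, pvSplitSp, reduceIte]
      rw [ih]
      rcases h : pvSplitSp cs with _ | ⟨w2, ws2⟩
      · exact absurd h (pvSplitSp_ne_nil cs)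
      · simp [List.modifyHead]

lemma pvWords_eq (cs : List Char) :
    ((cs.foldl pvASplitStep ([], [])).1 ++ [(cs.foldl pvASplitStep ([], [])).2]) =
      pvSplitSp cs := by
  rw [pvSplit_aux]
  rcases h : pvSplitSp cs with _ | ⟨w2, ws2⟩ <;> simp [List.modifyHead]

lemma pvRevLoop (wi : List Char) :
    (PySem.List.pyRange ((wi.length : Int) - 1) 0 (-1)).foldl
      (fun a2 j => a2 ++ [PySem.List.pyGetD wi j ' ']) [] = wi.tail.reverse := by
  rw [PySem.List.pyRange_neg_one, List.foldl_map, PySem.List.foldl_append_singleton_eq_map]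
  simp only [List.nil_append]
  apply List.ext_getElem
  · simp only [List.length_map, List.length_range, List.length_reverse, List.length_tail]
    omega
  · intro k h1 h2
    simp only [List.getElem_map, List.getElem_range, List.getElem_reverse, List.getElem_tail]
    rw [PySem.List.pyGetD_eq_getElem]
    · congr 1
      simp at h1 h2 ⊢
      omega
    · simp at h1 ⊢; omega
    · simp at h1 ⊢; omega

lemma pvA_rev_eq (words : List (List Char)) :
    pvA_rev words = words.map (fun w => PySem.List.pyGetD w 0 ' ' :: w.tail.reverse) := by
  unfold pvA_rev
  rw [PySem.List.foldl_pyRange_zero_pyGetD' words []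
      (fun acc wi => acc ++ [PySem.List.pyGetD wi 0 ' ' ::
        (PySem.List.pyRange ((wi.length : Int) - 1) 0 (-1)).foldl
          (fun a2 j => a2 ++ [PySem.List.pyGetD wi j ' ']) []]) []]
  rw [PySem.List.foldl_append_singleton_eq_map]
  simp only [List.nil_append]
  exact List.map_congr_left (fun w _ => by rw [pvRevLoop])

lemma pvA_initials_eq (rw : List (List Char)) :
    pvA_initials rw =
      (rw.drop 1).map (fun x => PySem.List.pyGetD x 0 ' ') ++
        [PySem.List.pyGetD (rw.getD 0 []) 0 ' '] := by
  unfold pvA_initials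
  rw [PySem.List.foldl_pyRange_pyGetD' rw []
      (fun acc x => acc ++ [PySem.List.pyGetD x 0 ' ']) [] (by norm_num : (0:Int) ≤ 1)]
  rw [PySem.List.foldl_append_singleton_eq_map]
  simp [PySem.List.pyGetD_natCast]
  congr 1
  rw [show ((0:Int)) = ((0:Nat):Int) by norm_num, PySem.List.pyGetD_natCast]
  simp [List.getD]

lemma pvA_newwords_eq (words rw : List (List Char)) (initials : List Char) :
    pvA_newwords words rw initials =
      (List.range words.length).map
        (fun i => initials.getD i ' ' :: (rw.getD i []).tail) := by
  unfold pvA_newwords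
  rw [PySem.List.pyRange_zero_natCast, List.foldl_map,
      PySem.List.foldl_append_singleton_eq_map]
  simp [PySem.List.pyGetD_natCast]

lemma pvXor_one (j : Nat) : j ^^^ 1 = if j % 2 = 0 then j + 1 else j - 1 := by
  have h1 : (1 : Nat) = Nat.bit true 0 := rfl
  rcases Nat.even_or_odd j with ⟨k, hk⟩ | ⟨k, hk⟩
  · have hj : j = Nat.bit false k := by simp [Nat.bit]; omega
    rw [hj, h1, Nat.xor_bit]
    simp [Nat.bit]
  · have hj : j = Nat.bit true k := by simp [Nat.bit]; omega
    rw [hj, h1, Nat.xor_bit]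
    simp [Nat.bit]

lemma pvPairLoop (nw : List (List Char)) (n m : Nat) (hm : m ≤ n) :
    (List.range m).foldl (fun arr (i : Nat) => pvA_pairstep (n : Int) nw arr (i : Int))
        (List.replicate n none) =
      (List.range n).map (fun j =>
        if 2 * (j / 2) + 1 < n ∧ 2 * (j / 2) < m then
          some (nw.getD (if j % 2 = 0 then j + 1 else j - 1) [])
        else none) := by
  induction m with
  | zero =>
    simp only [List.range_zero, List.foldl_nil]
    apply List.ext_getElem
    · simp
    · intro k h1 h2
      simp
  | succ m ih =>
    rw [List.range_succ, List.foldl_append, List.foldl_cons, List.foldl_nil,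
        ih (Nat.le_of_succ_le hm)]
    have hmn : m < n := hm
    unfold pvA_pairstep
    have hmod : PySem.Int.mod (m : Int) 2 = ((m % 2 : Nat) : Int) := PySem.Int.mod_natCast m 2
    by_cases hc : m % 2 = 0 ∧ m + 1 < n
    · rw [if_pos (⟨by rw [hmod, hc.1]; rfl, by exact_mod_cast hc.2⟩ :
          PySem.Int.mod (m : Int) 2 = 0 ∧ (m : Int) + 1 < (n : Int))]
      have e1 : ((m : Int) + 1) = ((m + 1 : Nat) : Int) := by push_cast; ring
      rw [e1, PySem.List.pyGetD_natCast, PySem.List.pyGetD_natCast,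
          Int.toNat_natCast, Int.toNat_natCast]
      apply List.ext_getElem
      · simp
      · intro k h1 h2
        simp only [List.length_set, List.length_map, List.length_range] at h1
        rw [List.getElem_set, List.getElem_set]
        simp only [List.getElem_map, List.getElem_range]
        rcases Nat.lt_trichotomy k m with h | h | h
        · have : ¬ (m + 1 = k) := by omega
          have : ¬ (m = k) := by omega
          simp only [if_neg ‹¬ (m + 1 = k)›, if_neg ‹¬ (m = k)›]
          by_cases hk : 2 * (k / 2) + 1 < n ∧ 2 * (k / 2) < m
          · rw [if_pos hk, if_pos (And.intro hk.1 (by omega : 2 * (k / 2) < _))]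
          · rw [if_neg hk, if_neg (by omega)]
        · subst h
          simp only [if_neg (by omega : ¬ (k + 1 = k))]
          simp only [if_pos (show True from trivial), eq_comm]
          rw [if_pos (And.intro (show 2 * (k / 2) + 1 < n by omega)
                (show 2 * (k / 2) < k + 1 by omega)), if_pos (show 0 = k % 2 from hc.1.symm)]
        · by_cases hk1 : m + 1 = k
          · simp only [if_pos hk1]
            rw [if_pos (And.intro (show 2 * (k / 2) + 1 < n by omega)
                  (show 2 * (k / 2) < m + 1 by omega)),
                if_neg (show ¬ k % 2 = 0 by omega)]
            congr 2
            omega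
          · rw [if_neg hk1, if_neg (show ¬ m = k by omega),
                if_neg (show ¬ (2 * (k / 2) + 1 < n ∧ 2 * (k / 2) < m) by omega),
                if_neg (show ¬ (2 * (k / 2) + 1 < n ∧ 2 * (k / 2) < m + 1) by omega)]
    · rw [if_neg (by
        intro ⟨ha, hb⟩
        apply hc
        constructor
        · rw [hmod] at ha; exact_mod_cast ha
        · exact_mod_cast hb)]
      apply List.map_congr_left
      intro j hj
      simp only [List.mem_range] at hj
      by_cases he : m % 2 = 0
      · have hn : ¬ (m + 1 < n) := by tauto
        by_cases hjm : 2 * (j / 2) = m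
        · rw [if_neg (by omega), if_neg (by omega)]
        · by_cases hk : 2 * (j / 2) + 1 < n ∧ 2 * (j / 2) < m
          · rw [if_pos hk, if_pos (And.intro hk.1 (by omega : 2 * (j / 2) < _))]
          · rw [if_neg hk, if_neg (by omega)]
      · have ho : m % 2 = 1 := by omega
        have : 2 * (j / 2) ≠ m := by omega
        by_cases hk : 2 * (j / 2) + 1 < n ∧ 2 * (j / 2) < m
        · rw [if_pos hk, if_pos (And.intro hk.1 (by omega : 2 * (j / 2) < _))]
        · rw [if_neg hk, if_neg (by omega)]

lemma pvFoldJoin (ws : List (List Char)) (acc : List Char) :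
    ws.foldl (fun acc w => acc ++ w ++ [' ']) acc =
      acc ++ (ws.map (fun w => w ++ [' '])).flatten := by
  induction ws generalizing acc with
  | nil => simp
  | cons w rest ih => simp

lemma pvJoin_eq (ws : List (List Char)) :
    (ws.foldl (fun acc w => acc ++ w ++ [' ']) []).dropLast = PySem.Chars.join [' '] ws := by
  rw [pvFoldJoin, List.nil_append]
  induction ws with
  | nil => simp [PySem.Chars.join, List.intercalate]
  | cons w rest ih =>
    cases rest with
    | nil => simp [PySem.Chars.join, List.intercalate]
    | cons w2 rest2 =>
      have hne : (List.map (fun w => w ++ [' ']) (w2 :: rest2)).flatten ≠ [] := by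
        rw [Ne, List.flatten_eq_nil_iff]
        push Not
        exact ⟨w2 ++ [' '], by simp, by simp⟩
      rw [PySem.Chars.join_cons_cons, ← ih, List.map_cons, List.flatten_cons,
          List.dropLast_append_of_ne_nil hne, List.append_assoc]

lemma pvGetD_neg_one {a : Type} (xs : List a) (d : a) (hx : xs ≠ []) :
    PySem.List.pyGetD xs (-1) d = xs.getD (xs.length - 1) d := by
  have hl : 0 < xs.length := List.length_pos_iff.mpr hx
  simp only [PySem.List.pyGetD, PySem.List.pyGet?, PySem.List.pyIdx?, List.getD]
  norm_num
  rw [if_pos (by omega : 1 ≤ xs.length)]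
  simp

lemma pvGetD_cons_zero (w : List Char) (a : Char) (d : Char) :
    PySem.List.pyGetD (a :: w) 0 d = a := by
  simp [PySem.List.pyGetD, PySem.List.pyGet?, PySem.List.pyIdx?]

lemma pvArr2_eq (nw : List (List Char)) (n : Nat) (hn : 0 < n) (hlen : nw.length = n) :
    (if PySem.List.pyGetD ((List.range n).map (fun j =>
          if 2 * (j / 2) + 1 < n ∧ 2 * (j / 2) < n then
            some (nw.getD (if j % 2 = 0 then j + 1 else j - 1) []) else none)) (-1) none = none
     then ((List.range n).map (fun j =>
          if 2 * (j / 2) + 1 < n ∧ 2 * (j / 2) < n then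
            some (nw.getD (if j % 2 = 0 then j + 1 else j - 1) []) else none)).set
        (((List.range n).map (fun j =>
          if 2 * (j / 2) + 1 < n ∧ 2 * (j / 2) < n then
            some (nw.getD (if j % 2 = 0 then j + 1 else j - 1) []) else none)).length - 1)
        (some (PySem.List.pyGetD nw (-1) []))
     else ((List.range n).map (fun j =>
          if 2 * (j / 2) + 1 < n ∧ 2 * (j / 2) < n then
            some (nw.getD (if j % 2 = 0 then j + 1 else j - 1) []) else none)))
    = (List.range n).map (fun j => some (nw.getD (if j ^^^ 1 < n then j ^^^ 1 else j) [])) := by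
  set g : Nat → Option (List Char) := fun j =>
      if 2 * (j / 2) + 1 < n ∧ 2 * (j / 2) < n then
        some (nw.getD (if j % 2 = 0 then j + 1 else j - 1) []) else none with hg
  have harr : ((List.range n).map g) ≠ [] := by simp; omega
  have hlast : PySem.List.pyGetD ((List.range n).map g) (-1) none = g (n - 1) := by
    rw [pvGetD_neg_one _ _ harr]
    simp only [List.length_map, List.length_range]
    rw [List.getD_eq_getElem _ _ (by simp; omega), List.getElem_map, List.getElem_range]
  by_cases hpar : n % 2 = 0
  · have hg1 : g (n - 1) = some (nw.getD (n - 1 - 1) []) := by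
      rw [hg]
      simp only []
      rw [if_pos (by omega), if_neg (by omega)]
    rw [if_neg (by rw [hlast, hg1]; simp)]
    apply List.map_congr_left
    intro j hj
    simp only [List.mem_range] at hj
    rw [hg]
    simp only []
    rw [if_pos (by omega), pvXor_one]
    by_cases hjp : j % 2 = 0
    · rw [if_pos hjp, if_pos (by omega)]
    · rw [if_neg hjp, if_pos (by omega)]
  · have hg1 : g (n - 1) = none := by
      rw [hg]
      simp only []
      rw [if_neg (by omega)]
    rw [if_pos (by rw [hlast, hg1])]
    rw [pvGetD_neg_one _ _ (by intro h; rw [h] at hlen; simp at hlen; omega)]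
    apply List.ext_getElem
    · simp
    · intro k h1 h2
      simp only [List.length_set, List.length_map, List.length_range] at h1 h2
      rw [List.getElem_set]
      simp only [List.length_map, List.length_range, List.getElem_map, List.getElem_range]
      by_cases hk1 : n - 1 = k
      · rw [if_pos hk1, pvXor_one, if_pos (show k % 2 = 0 by omega), if_neg (by omega)]
        congr 2
        omega
      · rw [if_neg hk1, hg]
        simp only []
        rw [if_pos (by omega), pvXor_one]
        by_cases hjp : k % 2 = 0
        · rw [if_pos hjp, if_pos (by omega)]
        · rw [if_neg hjp, if_pos (by omega)]

lemma pvNW_getD (words : List (List Char)) (k : Nat) (hk : k < words.length) :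
    ((List.range words.length).map (fun i =>
        ((((words.map (fun w => PySem.List.pyGetD w 0 ' ' :: w.tail.reverse)).drop 1).map
            (fun x => PySem.List.pyGetD x 0 ' ') ++
          [PySem.List.pyGetD ((words.map
              (fun w => PySem.List.pyGetD w 0 ' ' :: w.tail.reverse)).getD 0 []) 0 ' ']).getD i ' ') ::
          (((words.map (fun w => PySem.List.pyGetD w 0 ' ' :: w.tail.reverse)).getD i []).tail))).getD k []
      = pvNW words k := by
  set f : List Char → List Char := fun w => PySem.List.pyGetD w 0 ' ' :: w.tail.reverse with hf
  have hn : 0 < words.length := by omega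
  rw [List.getD_eq_getElem _ _ (by simpa using hk), List.getElem_map, List.getElem_range]
  have hrwk : (words.map f).getD k [] = f (words.getD k []) := by
    rw [List.getD_eq_getElem _ _ (by simpa using hk), List.getElem_map,
        List.getD_eq_getElem _ _ hk]
  have hrw0 : (words.map f).getD 0 [] = f (words.getD 0 []) := by
    rw [List.getD_eq_getElem _ _ (by simpa using hn), List.getElem_map,
        List.getD_eq_getElem _ _ hn]
  have htail : ((words.map f).getD k []).tail = (words.getD k []).tail.reverse := by
    rw [hrwk]; rfl
  have hinit : ((((words.map f).drop 1).map (fun x => PySem.List.pyGetD x 0 ' ') ++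
      [PySem.List.pyGetD ((words.map f).getD 0 []) 0 ' ']).getD k ' ')
      = PySem.List.pyGetD (words.getD ((k + 1) % words.length) []) 0 ' ' := by
    by_cases hke : k < words.length - 1
    · rw [List.getD_append _ _ _ _ (by simp; omega)]
      rw [List.getD_eq_getElem _ _ (by simp; omega), List.getElem_map, List.getElem_drop,
          List.getElem_map]
      rw [hf]
      simp only []
      rw [pvGetD_cons_zero]
      congr 1
      have hm1 : (k + 1) % words.length = k + 1 := Nat.mod_eq_of_lt (by omega)
      rw [hm1, List.getD_eq_getElem _ _ (by omega)]
      congr 1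
      omega
    · have hke2 : k = words.length - 1 := by omega
      rw [List.getD_append_right _ _ _ _ (by simp; omega)]
      have h0 : k - (((words.map f).drop 1).map (fun x => PySem.List.pyGetD x 0 ' ')).length = 0 := by
        simp; omega
      rw [h0]
      simp only [List.getD_cons_zero]
      rw [hrw0, hf]
      simp only []
      rw [pvGetD_cons_zero]
      have hm0 : (k + 1) % words.length = 0 := by
        have : k + 1 = words.length := by omega
        rw [this, Nat.mod_self]
      rw [hm0]
  rw [hinit, htail]
  rfl

lemma pvABody_eq (W : List (List Char)) (hW : W ≠ []) :
    pvABody W = String.ofList (PySem.Chars.join [' '] (pvFinal W)) := by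
  have hn : 0 < W.length := List.length_pos_iff.mpr hW
  show (pvABody W) = _
  simp only [pvABody]
  rw [pvA_rev_eq, pvA_initials_eq, pvA_newwords_eq]
  set NW : List (List Char) := (List.range W.length).map (fun i =>
      ((((W.map (fun w => PySem.List.pyGetD w 0 ' ' :: w.tail.reverse)).drop 1).map
          (fun x => PySem.List.pyGetD x 0 ' ') ++
        [PySem.List.pyGetD ((W.map
            (fun w => PySem.List.pyGetD w 0 ' ' :: w.tail.reverse)).getD 0 []) 0 ' ']).getD i ' ') ::
        (((W.map (fun w => PySem.List.pyGetD w 0 ' ' :: w.tail.reverse)).getD i []).tail)) with hNW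
  rw [PySem.List.pyRange_zero_natCast]
  simp only [List.foldl_map]
  rw [pvPairLoop NW W.length W.length le_rfl]
  rw [pvArr2_eq NW W.length hn (by rw [hNW]; simp)]
  have hmap1 : (List.map (fun j => some (NW.getD (if j ^^^ 1 < W.length then j ^^^ 1 else j) []))
        (List.range W.length))
      = List.map some ((List.range W.length).map (fun j => pvNW W (pvSrc W.length j))) := by
    rw [List.map_map]
    apply List.map_congr_left
    intro j hj
    simp only [List.mem_range] at hj
    have hsrc : (if j ^^^ 1 < W.length then j ^^^ 1 else j) = pvSrc W.length j := rfl
    have hs : pvSrc W.length j < W.length := by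
      unfold pvSrc
      split <;> omega
    rw [Function.comp_apply, hsrc, pvNW_getD W _ hs]
  rw [hmap1]
  simp only [List.foldl_map]
  have hstep : ∀ (x w : List Char),
      x ++ (if some w = some ['i'] then some ['I'] else some w).getD [] ++ [' ']
        = x ++ (if w = ['i'] then ['I'] else w) ++ [' '] := by
    intro x w
    by_cases h : w = ['i'] <;> simp [h]
  simp only [hstep]
  have hfin : pvFinal W = ((List.range W.length).map (fun j => pvNW W (pvSrc W.length j))).map
      (fun w => if w = ['i'] then ['I'] else w) := by
    rw [pvFinal, List.map_map]
    rfl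
  rw [hfin, ← pvJoin_eq]
  simp only [List.foldl_map]

lemma pvA_eq (text : String) :
    decrypt_it text =
      String.ofList (PySem.Chars.join [' '] (pvFinal (pvSplitSp text.toList))) := by
  unfold decrypt_it
  rw [pvWords_eq]
  exact pvABody_eq _ (pvSplitSp_ne_nil _)

lemma pvB_eq (text : String) :
    decrypt_it_alt text =
      String.ofList (PySem.Chars.join [' '] (pvFinal (pvSplitSp text.toList))) := by
  simp only [decrypt_it_alt]
  have hW : pvSplitSp text.toList ≠ [] := pvSplitSp_ne_nil _
  set W := pvSplitSp text.toList with hWdef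
  have hn : 0 < W.length := List.length_pos_iff.mpr hW
  congr 1
  rw [PySem.List.pyRange_zero_natCast]
  simp only [List.foldl_map]
  rw [PySem.List.foldl_append_singleton_eq_map]
  rw [List.nil_append]
  congr 1
  apply List.map_congr_left
  intro j hj
  simp only [List.mem_range] at hj
  have hbx : PySem.Int.bxor (j : Int) 1 = ((j ^^^ 1 : Nat) : Int) := by
    exact_mod_cast PySem.Int.bxor_natCast j 1
  have hsrc : (if PySem.Int.bxor (j : Int) 1 < (W.length : Int) then PySem.Int.bxor (j : Int) 1
      else (j : Int)) = ((pvSrc W.length j : Nat) : Int) := by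
    rw [hbx, pvSrc]
    by_cases h : j ^^^ 1 < W.length
    · rw [if_pos (by exact_mod_cast h), if_pos h]
    · rw [if_neg (by exact_mod_cast h), if_neg h]
  rw [hsrc]
  have hs : pvSrc W.length j < W.length := by
    unfold pvSrc
    split <;> omega
  have hmod : PySem.Int.mod (((pvSrc W.length j : Nat) : Int) + 1) (W.length : Int)
      = (((pvSrc W.length j + 1) % W.length : Nat) : Int) := by
    rw [show ((pvSrc W.length j : Nat) : Int) + 1 = ((pvSrc W.length j + 1 : Nat) : Int) by
          push_cast; ring,
        PySem.Int.mod_natCast]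
  rw [hmod, PySem.List.pyGetD_natCast, PySem.List.pyGetD_natCast,
      PySem.List.slice_from_one, PySem.List.slice?_none_none_neg_one, Option.getD_some]
  have hlt : (pvSrc W.length j + 1) % W.length < W.length := Nat.mod_lt _ hn
  have harg : ((W.map (fun w => PySem.List.pyGetD w 0 ' ')).getD
        ((pvSrc W.length j + 1) % W.length) ' ') :: (W.getD (pvSrc W.length j) []).tail.reverse
      = pvNW W (pvSrc W.length j) := by
    unfold pvNW
    congr 1
    rw [List.getD_eq_getElem _ _ (by simpa using hlt), List.getElem_map,
        List.getD_eq_getElem _ _ hlt]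
  rw [harg]

-- ===== VERDICT (by name: the statement is the Claim_ definition above) =====
theorem decrypt_it_spec : Claim_equal_decrypt_it := by
  intro text _ _
  unfold Spec_decrypt_it
  rw [pvA_eq, pvB_eq]
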